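-- pv_equiv track=rewrite | github.com/Berta-Robles/Programas1evaluacion | Fecha.py | devuelve_mes
-- ===== SOURCE A (Python) =====
-- def devuelve_mes(fecha):
--     mes=""
--     cont=0
--     n_espacios=0
--     longitud=len(fecha)
--     while(cont<longitud):
--         if(fecha[cont]==" "):
--             n_espacios=n_espacios+1
--         else:
--             if(n_espacios==2):
--                 mes=mes+fecha[cont]
--         cont=cont+1
--
--     return(mes)
-- ===== SOURCE B (Python) =====
-- def devuelve_mes(fecha):
--     parts = fecha.split(" ")
--     return parts[2] if len(parts) >= 3 else ""
-- ===== Notes on version B (the rewrite author's own statement) =====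
-- stated objective: idiomatic
-- what changed: Replaces A's character-by-character index loop maintaining a space counter and selective accumulator with split-on-space followed by indexing the third token.
import Mathlib
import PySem

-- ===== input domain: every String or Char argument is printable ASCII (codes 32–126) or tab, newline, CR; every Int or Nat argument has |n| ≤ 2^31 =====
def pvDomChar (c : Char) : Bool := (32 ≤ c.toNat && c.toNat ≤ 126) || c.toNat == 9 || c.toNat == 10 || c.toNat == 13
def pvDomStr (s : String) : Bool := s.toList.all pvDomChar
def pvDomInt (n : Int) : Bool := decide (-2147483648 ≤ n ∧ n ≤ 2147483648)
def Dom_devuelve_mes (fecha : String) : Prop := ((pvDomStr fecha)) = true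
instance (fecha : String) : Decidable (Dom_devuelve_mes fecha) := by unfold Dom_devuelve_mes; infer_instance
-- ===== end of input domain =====

-- B replaces A's index loop that accumulates characters seen after exactly two spaces
-- by split-on-space then take the third token (idiomatic decomposition); same return value.

-- ===== PORT A =====
-- while loop over index cont, state (mes, n_espacios)
def devuelve_mes (fecha : String) : String :=
  let cs := fecha.toList
  let final :=
    (PySem.List.pyRange 0 (PySem.List.len cs)).foldl
      (fun (st : List Char × Int) cont =>
        let c := PySem.List.pyGetD cs cont ' '   -- cont is always in range in the loop
        if c == ' ' then (st.1, st.2 + 1)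
        else if st.2 == 2 then (st.1 ++ [c], st.2)
        else (st.1, st.2))
      ([], 0)
  String.ofList final.1

-- ===== PORT B =====
def devuelve_mes_alt (fecha : String) : String :=
  let parts := (PySem.Str.split? fecha " ").getD []
  if 3 ≤ parts.length then parts.getD 2 "" else ""

-- ===== PRECONDITION & SPEC =====
def Spec_devuelve_mes (fecha : String) (out : String) : Prop := out = devuelve_mes_alt fecha
instance (fecha : String) (out : String) : Decidable (Spec_devuelve_mes fecha out) := by unfold Spec_devuelve_mes; infer_instance

-- ===== CLAIM (what is proved, stated in full; the proofs are below) =====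
def Claim_equal_devuelve_mes : Prop := ∀ (fecha : String), Dom_devuelve_mes fecha → Spec_devuelve_mes fecha (devuelve_mes fecha)

-- ===== LEMMAS AND PROOFS =====

/-- Reference splitter: split a char list on single spaces (front-to-back). -/
def pvSplit1 : List Char → List (List Char)
  | [] => [[]]
  | c :: cs =>
    if c = ' ' then [] :: pvSplit1 cs
    else
      match pvSplit1 cs with
      | [] => [[c]]
      | h :: t => (c :: h) :: t

theorem pvSplit1_ne_nil (cs : List Char) : pvSplit1 cs ≠ [] := by
  cases cs with
  | nil => simp [pvSplit1]
  | cons c cs =>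
    simp only [pvSplit1]
    split <;> [simp; (split <;> simp)]

theorem pvGo_eq (fuel : Nat) (l cur : List Char) (acc : List (List Char))
    (h : l.length < fuel) :
    PySem.Chars.splitOn.go [' '] fuel l cur acc =
      acc.reverse ++
        (match pvSplit1 l with
         | [] => [cur.reverse]
         | h :: t => (cur.reverse ++ h) :: t) := by
  induction fuel generalizing l cur acc with
  | zero => omega
  | succ fuel ih =>
    cases l with
    | nil =>
      rw [PySem.Chars.splitOn.go.eq_def]
      simp [pvSplit1]
    | cons c rest =>
      rw [PySem.Chars.splitOn.go.eq_def]
      simp only []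
      by_cases hc : c = ' '
      · subst hc
        have hpre : ([' '] : List Char).isPrefixOf (' ' :: rest) = true := by
          simp [List.isPrefixOf]
        simp only [hpre, if_true, List.length_singleton, List.drop_one, List.tail_cons]
        rw [ih rest [] (cur.reverse :: acc) (by simpa using Nat.lt_of_succ_lt_succ h)]
        have := pvSplit1_ne_nil rest
        cases hs : pvSplit1 rest with
        | nil => exact absurd hs this
        | cons a t => simp [pvSplit1, hs]
      · have hpre : ([' '] : List Char).isPrefixOf (c :: rest) = false := by
          unfold List.isPrefixOf
          simp only [List.isPrefixOf, Bool.and_eq_false_iff, beq_eq_false_iff_ne, ne_eq]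
          exact Or.inl fun h => hc h.symm
        simp only [hpre, Bool.false_eq_true, if_false]
        rw [ih rest (c :: cur) acc (by simpa using Nat.lt_of_succ_lt_succ h)]
        have := pvSplit1_ne_nil rest
        cases hs : pvSplit1 rest with
        | nil => exact absurd hs this
        | cons a t => simp [pvSplit1, hs, hc]

theorem pvSplitOn_eq (cs : List Char) : PySem.Chars.splitOn cs [' '] = pvSplit1 cs := by
  unfold PySem.Chars.splitOn
  rw [pvGo_eq (cs.length + 1) cs [] [] (by omega)]
  have := pvSplit1_ne_nil cs
  cases hs : pvSplit1 cs with
  | nil => exact absurd hs this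
  | cons a t => simp

/-- A's loop body as a function on (mes, n_espacios). -/
def pvStep (st : List Char × Int) (c : Char) : List Char × Int :=
  if c == ' ' then (st.1, st.2 + 1)
  else if st.2 == 2 then (st.1 ++ [c], st.2)
  else (st.1, st.2)

theorem pvFold_inv (cs : List Char) (n : Int) (mes : List Char) (hn : 0 ≤ n) :
    (cs.foldl pvStep (mes, n)).1 =
      mes ++ (if n ≤ 2 then (pvSplit1 cs).getD (2 - n).toNat [] else []) := by
  induction cs generalizing n mes with
  | nil =>
    simp only [List.foldl_nil, pvSplit1]
    split
    · rename_i h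
      have : (2 - n).toNat = 0 ∨ (2 - n).toNat = 1 ∨ (2 - n).toNat = 2 := by omega
      rcases this with h' | h' | h' <;> simp [h']
    · simp
  | cons c cs ih =>
    simp only [List.foldl_cons]
    by_cases hc : c = ' '
    · subst hc
      simp only [pvStep, beq_self_eq_true, if_true]
      rw [ih (n + 1) mes (by omega)]
      simp only [pvSplit1, if_true]
      by_cases h1 : n + 1 ≤ 2
      · have h2 : n ≤ 2 := by omega
        have : (2 - n).toNat = (2 - (n + 1)).toNat + 1 := by omega
        simp [h1, h2, this]
      · by_cases h2 : n ≤ 2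
        · have hn2 : n = 2 := by omega
          have : (2 - n).toNat = 0 := by omega
          simp [h1, h2, this]
        · simp [h1, h2]
    · have hcb : (c == ' ') = false := by simpa using hc
      simp only [pvStep, hcb, Bool.false_eq_true, if_false]
      by_cases h2 : n = 2
      · subst h2
        simp only [beq_self_eq_true, if_true]
        rw [ih 2 (mes ++ [c]) (by omega)]
        have := pvSplit1_ne_nil cs
        cases hs : pvSplit1 cs with
        | nil => exact absurd hs this
        | cons a t => simp [pvSplit1, hs, hc]
      · have h2b : (n == 2) = false := by simpa using h2
        simp only [h2b, Bool.false_eq_true, if_false]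
        rw [ih n mes hn]
        by_cases hle : n ≤ 2
        · have := pvSplit1_ne_nil cs
          cases hs : pvSplit1 cs with
          | nil => exact absurd hs this
          | cons a t =>
            have hk : ∃ k, (2 - n).toNat = k + 1 := ⟨(1 - n).toNat, by omega⟩
            obtain ⟨k, hk⟩ := hk
            simp [pvSplit1, hs, hc, hle, hk]
        · have := pvSplit1_ne_nil cs
          cases hs : pvSplit1 cs with
          | nil => exact absurd hs this
          | cons a t => simp [hle]

theorem pvA_eq (fecha : String) :
    devuelve_mes fecha = String.ofList ((pvSplit1 fecha.toList).getD 2 []) := by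
  unfold devuelve_mes
  have hfold :
      (PySem.List.pyRange 0 (PySem.List.len fecha.toList)).foldl
        (fun (st : List Char × Int) cont =>
          let c := PySem.List.pyGetD fecha.toList cont ' '
          if c == ' ' then (st.1, st.2 + 1)
          else if st.2 == 2 then (st.1 ++ [c], st.2)
          else (st.1, st.2)) ([], 0)
      = fecha.toList.foldl pvStep ([], 0) := by
    have := PySem.List.foldl_pyRange_pyGetD fecha.toList ' ' pvStep (([], 0) : List Char × Int)
      (a := 0) (by omega)
    simpa [pvStep] using this
  simp only [hfold]
  rw [pvFold_inv fecha.toList 0 [] (by omega)]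
  norm_num
  rfl

theorem pvB_eq (fecha : String) :
    devuelve_mes_alt fecha = String.ofList ((pvSplit1 fecha.toList).getD 2 []) := by
  unfold devuelve_mes_alt
  have hsplit : PySem.Str.split? fecha " " =
      some ((pvSplit1 fecha.toList).map String.ofList) := by
    unfold PySem.Str.split?
    simp [PySem.Chars.split?, pvSplitOn_eq]
  simp only [hsplit, Option.getD_some, List.length_map]
  by_cases h : 3 ≤ (pvSplit1 fecha.toList).length
  · have h2 : 2 < (pvSplit1 fecha.toList).length := by omega
    simp [h, List.getD, h2]
  · have h2 : (pvSplit1 fecha.toList).length ≤ 2 := by omega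
    rw [if_neg h]
    have : (pvSplit1 fecha.toList)[2]? = none := by
      rw [List.getElem?_eq_none]; omega
    simp [List.getD, this]

-- ===== VERDICT (by name: the statement is the Claim_ definition above) =====
theorem devuelve_mes_spec : Claim_equal_devuelve_mes := by
  intro fecha _
  unfold Spec_devuelve_mes
  rw [pvA_eq, pvB_eq]
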